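-- pv_equiv track=rewrite | github.com/fazylow/AQA-Training | main.py | extra_case
-- ===== SOURCE A (Python) =====
-- def fizzbuzz(number):
--     if number % 3 == 0 and number % 5 == 0:
--         return "FizzBuzz"
--     elif number % 5 == 0:
--         return "Buzz"
--     elif number % 3 == 0:
--         return "Fizz"
--     else:
--         return number
--
-- def extra_case(x):
--     storage = {"FizzBuzz": 0, "Fizz": 0, "Buzz": 0}
--     for numbers in x:
--         z = fizzbuzz(numbers)
--         if z == "FizzBuzz":
--             storage["FizzBuzz"] += 1
--         if z == "Fizz":
--             storage["Fizz"] += 1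
--         if z == "Buzz":
--             storage["Buzz"] += 1
--     return storage
-- ===== SOURCE B (Python) =====
-- def extra_case(x):
--     return {
--         "FizzBuzz": sum(1 for n in x if n % 3 == 0 and n % 5 == 0),
--         "Fizz": sum(1 for n in x if n % 3 == 0 and n % 5 != 0),
--         "Buzz": sum(1 for n in x if n % 5 == 0 and n % 3 != 0),
--     }
-- ===== Notes on version B (the rewrite author's own statement) =====
-- stated objective: simpler
-- what changed: Replaced the fizzbuzz string-classification helper and the mutated counter dict with a dict literal whose three counts are computed by three independent mutually-exclusive divisibility scans.
import Mathlib
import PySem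

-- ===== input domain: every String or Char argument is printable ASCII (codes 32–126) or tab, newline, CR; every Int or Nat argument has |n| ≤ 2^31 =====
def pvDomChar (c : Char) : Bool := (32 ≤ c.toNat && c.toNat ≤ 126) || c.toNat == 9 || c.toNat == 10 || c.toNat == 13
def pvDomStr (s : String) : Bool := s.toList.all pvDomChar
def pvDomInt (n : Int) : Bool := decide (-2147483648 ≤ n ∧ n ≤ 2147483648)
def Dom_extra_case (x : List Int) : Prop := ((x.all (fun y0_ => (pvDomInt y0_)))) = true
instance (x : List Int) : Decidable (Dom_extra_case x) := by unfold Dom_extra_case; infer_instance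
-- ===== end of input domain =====

-- B replaces the fizzbuzz helper and the mutated counter dict by a dict literal of
-- three independent, mutually exclusive divisibility counts (objective: simpler).

-- ===== PORT A =====
def fizzbuzz (number : Int) : Sum String Int :=
  if PySem.Int.mod number 3 = 0 ∧ PySem.Int.mod number 5 = 0 then Sum.inl "FizzBuzz"
  else if PySem.Int.mod number 5 = 0 then Sum.inl "Buzz"
  else if PySem.Int.mod number 3 = 0 then Sum.inl "Fizz"
  else Sum.inr number

-- body of A's for-loop, named so the proof can speak about one iteration
def stepA (d : PySem.Dict String Int) (numbers : Int) : PySem.Dict String Int :=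
  let z := fizzbuzz numbers
  let d := if z = Sum.inl "FizzBuzz" then d.modify "FizzBuzz" 0 (· + 1) else d
  let d := if z = Sum.inl "Fizz" then d.modify "Fizz" 0 (· + 1) else d
  if z = Sum.inl "Buzz" then d.modify "Buzz" 0 (· + 1) else d

def extra_case (x : List Int) : List (String × Int) :=
  let storage : PySem.Dict String Int :=
    PySem.Dict.ofList [("FizzBuzz", 0), ("Fizz", 0), ("Buzz", 0)]
  let storage := x.foldl stepA storage
  storage.items

-- ===== PORT B =====
def extra_case_alt (x : List Int) : List (String × Int) :=
  [("FizzBuzz", (x.countP fun n => PySem.Int.mod n 3 == 0 && PySem.Int.mod n 5 == 0 : Nat)),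
   ("Fizz", (x.countP fun n => PySem.Int.mod n 3 == 0 && PySem.Int.mod n 5 != 0 : Nat)),
   ("Buzz", (x.countP fun n => PySem.Int.mod n 5 == 0 && PySem.Int.mod n 3 != 0 : Nat))]

-- ===== PRECONDITION & SPEC =====
def Spec_extra_case (x : List Int) (out : List (String × Int)) : Prop := out = extra_case_alt x
instance (x : List Int) (out : List (String × Int)) : Decidable (Spec_extra_case x out) := by unfold Spec_extra_case; infer_instance

-- ===== CLAIM (what is proved, stated in full; the proofs are below) =====
def Claim_equal_extra_case : Prop := ∀ (x : List Int), Dom_extra_case x → Spec_extra_case x (extra_case x)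

-- ===== LEMMAS AND PROOFS =====
theorem extra_case_loop (x : List Int) (a b c : Int) :
    (x.foldl stepA (PySem.Dict.mk [("FizzBuzz", a), ("Fizz", b), ("Buzz", c)])).items =
    [("FizzBuzz", a + (x.countP fun n => PySem.Int.mod n 3 == 0 && PySem.Int.mod n 5 == 0 : Nat)),
     ("Fizz", b + (x.countP fun n => PySem.Int.mod n 3 == 0 && PySem.Int.mod n 5 != 0 : Nat)),
     ("Buzz", c + (x.countP fun n => PySem.Int.mod n 5 == 0 && PySem.Int.mod n 3 != 0 : Nat))] := by
  induction x generalizing a b c with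
  | nil => simp
  | cons n xs ih =>
    have hstep : ∀ a b c : Int, stepA (PySem.Dict.mk [("FizzBuzz", a), ("Fizz", b), ("Buzz", c)]) n =
        PySem.Dict.mk [("FizzBuzz", if (3:Int) ∣ n ∧ (5:Int) ∣ n then a + 1 else a),
                       ("Fizz", if (3:Int) ∣ n ∧ ¬ (5:Int) ∣ n then b + 1 else b),
                       ("Buzz", if (5:Int) ∣ n ∧ ¬ (3:Int) ∣ n then c + 1 else c)] := by
      intro a b c
      by_cases h3 : (3:Int) ∣ n <;> by_cases h5 : (5:Int) ∣ n <;>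
        simp [stepA, fizzbuzz, h3, h5, PySem.Dict.modify, PySem.Dict.insert, PySem.Dict.getD,
          PySem.Dict.get?, PySem.Dict.contains]
    rw [List.foldl_cons, hstep, ih]
    by_cases h3 : (3:Int) ∣ n <;> by_cases h5 : (5:Int) ∣ n <;>
      simp [h3, h5] <;> ring

-- ===== VERDICT =====
theorem extra_case_spec : Claim_equal_extra_case := by
  intro x _
  show extra_case x = extra_case_alt x
  simpa [extra_case, PySem.Dict.ofList, extra_case_alt] using extra_case_loop x 0 0 0
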